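-- pv_equiv track=rewrite | github.com/pauljump/vayo | scripts/unify_listings.py | slug_to_borough
-- ===== SOURCE A (Python) =====
-- def slug_to_borough(slug):
--     """Guess borough from SE building slug suffix."""
--     s = slug.lower()
--     for tag, code in [
--         ("-new_york", "MN"), ("-manhattan", "MN"),
--         ("-brooklyn", "BK"),
--         ("-queens", "QN"),
--         ("-bronx", "BX"), ("-the_bronx", "BX"),
--         ("-staten_island", "SI"),
--     ]:
--         if s.endswith(tag):
--             return code
--     return None
-- ===== SOURCE B (Python) =====
-- _BOROUGHS = {
--     "new_york": "MN", "manhattan": "MN",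
--     "brooklyn": "BK",
--     "queens": "QN",
--     "bronx": "BX", "the_bronx": "BX",
--     "staten_island": "SI",
-- }
--
-- def slug_to_borough(slug):
--     """Guess borough from SE building slug suffix."""
--     s = slug.lower()
--     if '-' not in s:
--         return None
--     return _BOROUGHS.get(s.rsplit('-', 1)[1])
-- ===== Notes on version B (the rewrite author's own statement) =====
-- stated objective: idiomatic
-- what changed: Replaces the ordered endswith-scan over the seven dash-prefixed tags by a dash-membership guard plus a single constant-dict lookup of the slug's last dash-separated segment.
import Mathlib
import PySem

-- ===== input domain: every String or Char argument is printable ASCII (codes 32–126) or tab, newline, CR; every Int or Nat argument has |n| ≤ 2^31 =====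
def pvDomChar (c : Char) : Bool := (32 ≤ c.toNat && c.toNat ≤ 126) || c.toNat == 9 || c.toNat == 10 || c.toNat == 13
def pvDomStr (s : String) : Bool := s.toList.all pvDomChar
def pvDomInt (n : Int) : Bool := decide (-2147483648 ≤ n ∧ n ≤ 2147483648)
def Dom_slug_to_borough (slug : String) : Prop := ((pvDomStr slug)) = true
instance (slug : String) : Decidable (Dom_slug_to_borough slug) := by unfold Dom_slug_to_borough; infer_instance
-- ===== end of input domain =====

-- B replaces A's ordered endswith-scan over seven tags by a guard on '-' plus a single
-- dict lookup of the last '-'-separated segment (idiomatic; same asymptotic cost).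

-- ===== PORT A =====
-- A: lower the slug, then scan the literal tag list in order, returning the code of the
-- first tag the string ends with; the loop over the 7 literal pairs is unrolled in order.
def slug_to_borough (slug : String) : Option String :=
  let s := PySem.Str.lower slug
  if PySem.Str.endswith s "-new_york" then some "MN"
  else if PySem.Str.endswith s "-manhattan" then some "MN"
  else if PySem.Str.endswith s "-brooklyn" then some "BK"
  else if PySem.Str.endswith s "-queens" then some "QN"
  else if PySem.Str.endswith s "-bronx" then some "BX"
  else if PySem.Str.endswith s "-the_bronx" then some "BX"
  else if PySem.Str.endswith s "-staten_island" then some "SI"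
  else none

-- ===== PORT B =====
def pvBoroughs : PySem.Dict String String :=
  PySem.Dict.ofList
    [("new_york", "MN"), ("manhattan", "MN"), ("brooklyn", "BK"), ("queens", "QN"),
     ("bronx", "BX"), ("the_bronx", "BX"), ("staten_island", "SI")]

-- s.rsplit('-', 1)[1]: exact when '-' occurs in s (the part after the LAST '-'),
-- which the caller guarantees; ported by hand as takeWhile on the reversed char list.
def pvLastSeg (s : String) : String :=
  String.ofList ((s.toList.reverse.takeWhile (· != '-')).reverse)

def slug_to_borough_alt (slug : String) : Option String :=
  let s := PySem.Str.lower slug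
  if PySem.Str.isIn "-" s then pvBoroughs.get? (pvLastSeg s)
  else none

-- ===== PRECONDITION & SPEC =====
def Spec_slug_to_borough (slug : String) (out : Option String) : Prop := out = slug_to_borough_alt slug
instance (slug : String) (out : Option String) : Decidable (Spec_slug_to_borough slug out) := by unfold Spec_slug_to_borough; infer_instance

-- ===== CLAIM (what is proved, stated in full; the proofs are below) =====
def Claim_equal_slug_to_borough : Prop := ∀ (slug : String), Dom_slug_to_borough slug → Spec_slug_to_borough slug (slug_to_borough slug)

-- ===== LEMMAS AND PROOFS =====

-- Prefix of a reversed list vs takeWhile: r starts with t' ++ ['-'] (t' dash-free)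
-- iff '-' occurs in r and the dash-free head of r is exactly t'.
theorem pv_takeWhile_pref (t' : List Char) (ht : '-' ∉ t') (r : List Char) :
    (t' ++ ['-']) <+: r ↔ ('-' ∈ r ∧ r.takeWhile (· != '-') = t') := by
  induction t' generalizing r with
  | nil =>
    cases r with
    | nil => simp
    | cons c r' =>
      by_cases hc : c = '-'
      · subst hc; simp
      · have hc' : ¬ (('-' : Char) = c) := fun h => hc h.symm
        simp [List.cons_prefix_cons, hc, hc']
  | cons a t ih =>
    have ha : ¬ (a = '-') := fun h => ht (h ▸ List.mem_cons_self)
    have ht' : '-' ∉ t := fun h => ht (List.mem_cons_of_mem _ h)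
    cases r with
    | nil => simp
    | cons c r' =>
      by_cases hc : c = '-'
      · subst hc
        simp [List.cons_prefix_cons, ha]
      · have hc' : ¬ (('-' : Char) = c) := fun h => hc h.symm
        simp only [List.cons_append, List.cons_prefix_cons, List.takeWhile_cons,
          List.mem_cons, hc, hc', bne_iff_ne, ne_eq, not_false_iff, if_pos, false_or,
          ih ht' r', List.cons.injEq]
        constructor
        · rintro ⟨hca, hm, htw⟩; exact ⟨hm, hca.symm, htw⟩
        · rintro ⟨hm, hca, htw⟩; exact ⟨hca.symm, hm, htw⟩

-- endswith against a tag '-'::t with dash-free t, characterised by the last segment.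
theorem pv_endswith_char (l t : List Char) (ht : '-' ∉ t) :
    PySem.Chars.endswith l ('-' :: t)
      = (decide ('-' ∈ l) && decide ((l.reverse.takeWhile (· != '-')).reverse = t)) := by
  have ht' : '-' ∉ t.reverse := by simpa using ht
  have key : ('-' :: t) <:+ l ↔ ('-' ∈ l ∧ (l.reverse.takeWhile (· != '-')).reverse = t) := by
    rw [← List.reverse_prefix, List.reverse_cons,
        pv_takeWhile_pref t.reverse ht' l.reverse]
    constructor
    · rintro ⟨hm, htw⟩
      exact ⟨List.mem_reverse.mp hm, by rw [htw]; simp⟩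
    · rintro ⟨hm, htw⟩
      exact ⟨List.mem_reverse.mpr hm, by rw [← htw]; simp⟩
  by_cases h : ('-' :: t) <:+ l
  · rw [(PySem.Chars.endswith_iff l ('-' :: t)).mpr h]
    obtain ⟨hm, htw⟩ := key.mp h
    simp [hm, htw]
  · have hb : PySem.Chars.endswith l ('-' :: t) = false := by
      rcases Bool.eq_false_or_eq_true (PySem.Chars.endswith l ('-' :: t)) with hb | hb
      · exact absurd ((PySem.Chars.endswith_iff l ('-' :: t)).mp hb) h
      · exact hb
    rw [hb]
    rw [key] at h
    symm
    simp only [Bool.and_eq_false_iff, decide_eq_false_iff_not]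
    tauto

theorem slug_to_borough_eq (slug : String) :
    slug_to_borough slug = slug_to_borough_alt slug := by
  unfold slug_to_borough slug_to_borough_alt pvLastSeg
  simp only [PySem.Str.endswith_eq, PySem.Str.isIn_eq, PySem.Str.toList_lower]
  set l := PySem.Chars.lower slug.toList with hl
  have hin : PySem.Chars.isIn "-".toList l = decide ('-' ∈ l) := by
    rcases Bool.eq_false_or_eq_true (PySem.Chars.isIn "-".toList l) with hb | hb <;> rw [hb]
    · have h := (PySem.Chars.isIn_iff_infix "-".toList l).mp hb
      rw [show ("-".toList : List Char) = ['-'] from rfl, List.singleton_infix_iff] at h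
      simp [h]
    · have h : ¬ ('-' ∈ l) := by
        intro hmem
        have hinf : ("-".toList : List Char) <:+: l := by
          rw [show ("-".toList : List Char) = ['-'] from rfl]
          exact (List.singleton_infix_iff '-' l).mpr hmem
        have hT := (PySem.Chars.isIn_iff_infix "-".toList l).mpr hinf
        rw [hT] at hb
        exact absurd hb (by decide)
      simp [h]
  rw [hin]
  rw [show ("-new_york".toList : List Char) = '-' :: "new_york".toList from rfl,
      show ("-manhattan".toList : List Char) = '-' :: "manhattan".toList from rfl,
      show ("-brooklyn".toList : List Char) = '-' :: "brooklyn".toList from rfl,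
      show ("-queens".toList : List Char) = '-' :: "queens".toList from rfl,
      show ("-bronx".toList : List Char) = '-' :: "bronx".toList from rfl,
      show ("-the_bronx".toList : List Char) = '-' :: "the_bronx".toList from rfl,
      show ("-staten_island".toList : List Char) = '-' :: "staten_island".toList from rfl]
  rw [pv_endswith_char l _ (by decide), pv_endswith_char l _ (by decide),
      pv_endswith_char l _ (by decide), pv_endswith_char l _ (by decide),
      pv_endswith_char l _ (by decide), pv_endswith_char l _ (by decide),
      pv_endswith_char l _ (by decide)]
  by_cases hm : '-' ∈ l
  · simp only [hm, decide_true, Bool.true_and, if_true]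
    set seg := (l.reverse.takeWhile (· != '-')).reverse with hseg
    have hkey : ∀ key : String, (key == String.ofList seg) = decide (seg = key.toList) := by
      intro key
      by_cases h : seg = key.toList
      · rw [h]; simp
      · have hne : key ≠ String.ofList seg := fun he => h (by rw [he]; simp)
        simp [h, hne]
    have hdict : pvBoroughs = PySem.Dict.mk
        [("new_york", "MN"), ("manhattan", "MN"), ("brooklyn", "BK"), ("queens", "QN"),
         ("bronx", "BX"), ("the_bronx", "BX"), ("staten_island", "SI")] := by rfl
    simp only [hdict, PySem.Dict.get?_mk_cons, hkey]
    by_cases h1 : seg = "new_york".toList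
    · simp [h1]
    · by_cases h2 : seg = "manhattan".toList
      · simp [h2]
      · by_cases h3 : seg = "brooklyn".toList
        · simp [h3]
        · by_cases h4 : seg = "queens".toList
          · simp [h4]
          · by_cases h5 : seg = "bronx".toList
            · simp [h5]
            · by_cases h6 : seg = "the_bronx".toList
              · simp [h6]
              · by_cases h7 : seg = "staten_island".toList
                · simp [h7]
                · simp [PySem.Dict.get?]
  · simp [hm]

-- ===== VERDICT (by name: the statement is the Claim_ definition above) =====
theorem slug_to_borough_spec : Claim_equal_slug_to_borough := by
  intro slug _
  unfold Spec_slug_to_borough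
  exact slug_to_borough_eq slug
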